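-- pv_equiv track=rewrite | github.com/Sin-Yejun/Coding-Study | Programmers/메뉴 리뉴얼.py | solution
-- ===== SOURCE A (Python) =====
-- from itertools import combinations
--
-- def solution(orders, course):
--     recipe_dict = {}
--     for i in orders:
--         i = sorted(list(i))
--         for j in range(2,len(i)+1):
--             for com in combinations(i,j):
--                 tmp = ''.join(com)
--                 if tmp in recipe_dict:
--                     recipe_dict[tmp] += 1
--                 else:
--                     recipe_dict[tmp] = 1
--     result = []
--     for i in course:
--         temp = []
--         for key, val in recipe_dict.items():
--             if len(key) == i and val > 1:
--                 temp.append((key, val))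
--         if temp:
--             for key, val in temp:
--                 if val == max(temp,key= lambda x : x[1])[1]:
--                     result.append(key)
--     result.sort()
--     return result
-- ===== SOURCE B (Python) =====
-- from itertools import combinations
-- from collections import Counter
--
-- def solution(orders, course):
--     result = []
--     sorted_orders = [''.join(sorted(o)) for o in orders]
--     maxlen = max(map(len, orders), default=0)
--     for L in course:
--         if L < 2 or L > maxlen:
--             continue  # no combination shorter than 2 or longer than the longest order exists
--         cnt = Counter(''.join(c) for o in sorted_orders for c in combinations(o, L))
--         best = {k: v for k, v in cnt.items() if v > 1}
--         if best:
--             m = max(best.values())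
--             result.extend(k for k in best if best[k] == m)
--     return sorted(result)
-- ===== Notes on version B (the rewrite author's own statement) =====
-- stated objective: faster
-- what changed: Instead of building one global dict of combinations of every size 2..len(order) with nested range loops and membership tests and then filtering it per course length, B loops over the course lengths, tallies only the length-L combinations (skipping L<2 and L longer than the longest order) into a per-length Counter, and picks the tied maxima from that Counter directly.
import Mathlib
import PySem

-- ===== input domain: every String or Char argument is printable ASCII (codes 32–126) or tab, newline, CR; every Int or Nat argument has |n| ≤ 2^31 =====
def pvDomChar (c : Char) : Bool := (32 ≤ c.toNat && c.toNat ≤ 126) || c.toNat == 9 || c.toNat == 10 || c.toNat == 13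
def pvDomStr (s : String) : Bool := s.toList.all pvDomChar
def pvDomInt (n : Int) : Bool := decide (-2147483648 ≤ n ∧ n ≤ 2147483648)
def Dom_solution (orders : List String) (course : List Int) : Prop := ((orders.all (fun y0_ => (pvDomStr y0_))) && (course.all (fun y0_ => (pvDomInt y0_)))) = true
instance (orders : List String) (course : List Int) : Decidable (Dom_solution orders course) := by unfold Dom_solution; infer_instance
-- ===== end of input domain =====

-- B tallies combinations per course length with a per-length Counter (skipping impossible lengths) instead of A's one global dict over all lengths; measurably faster, same results.


-- ===== PORT A =====
-- `if tmp in recipe_dict: recipe_dict[tmp] += 1 else: recipe_dict[tmp] = 1`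
def pvA_step (d : PySem.Dict String Int) (tmp : String) : PySem.Dict String Int :=
  if d.contains tmp then d.insert tmp (d.getD tmp 0 + 1) else d.insert tmp 1

-- the first loop nest of A: build recipe_dict
def pvA_dict (orders : List String) : PySem.Dict String Int :=
  orders.foldl (fun d i0 =>
    let i := PySem.List.sorted i0.toList (fun c => c) false
    (PySem.List.pyRange 2 ((i.length : Int) + 1) 1).foldl (fun d j =>
      (PySem.List.combinations i j.toNat).foldl (fun d com => pvA_step d (String.ofList com)) d) d)
    PySem.Dict.empty

-- `temp = []; for key, val in recipe_dict.items(): if len(key) == i and val > 1: temp.append((key, val))`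
def pvA_temp (d : PySem.Dict String Int) (i : Int) : List (String × Int) :=
  d.items.foldl (fun t p => if PySem.Str.len p.1 == i && decide (p.2 > 1) then t ++ [p] else t) []

def solution (orders : List String) (course : List Int) : List String :=
  let recipe_dict := pvA_dict orders
  let result := course.foldl (fun result i =>
    let temp := pvA_temp recipe_dict i
    if temp.isEmpty then result
    else temp.foldl (fun r p =>
      match PySem.List.max? temp (fun x => x.2) with   -- max(temp, key=lambda x: x[1]); temp ≠ [] here
      | some mx => if p.2 == mx.2 then r ++ [p.1] else r
      | none => r) result) []
  PySem.List.sorted result (fun x => x) false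

-- ===== PORT B =====
-- the generator `''.join(c) for o in sorted_orders for c in combinations(o, L)`
def pvB_all (sorted_orders : List String) (r : Nat) : List String :=
  sorted_orders.flatMap (fun o => (PySem.List.combinations o.toList r).map String.ofList)

def solution_alt (orders : List String) (course : List Int) : List String :=
  let sorted_orders := orders.map (fun o => String.ofList (PySem.List.sorted o.toList (fun c => c) false))
  let maxlen := (PySem.List.max? (orders.map (fun o => PySem.Str.len o)) (fun v => v)).getD 0
  let result := course.foldl (fun result L =>
    if L < 2 ∨ maxlen < L then result
    else
      -- best = {k: v for k, v in cnt.items() if v > 1} (keys of a Counter are distinct)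
      let best := (PySem.Dict.counter (pvB_all sorted_orders L.toNat)).items.filter (fun p => decide (p.2 > 1))
      match PySem.List.max? (best.map (fun p => p.2)) (fun v => v) with  -- m = max(best.values()) if best else skip
      | none => result
      | some m => result ++ (best.filter (fun p => p.2 == m)).map (fun p => p.1)) []
  PySem.List.sorted result (fun x => x) false

-- ===== PRECONDITION & SPEC =====
def Spec_solution (orders : List String) (course : List Int) (out : List String) : Prop := out = solution_alt orders course
instance (orders : List String) (course : List Int) (out : List String) : Decidable (Spec_solution orders course out) := by unfold Spec_solution; infer_instance

-- ===== CLAIM (what is proved, stated in full; the proofs are below) =====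
def Claim_equal_solution : Prop := ∀ (orders : List String) (course : List Int), Dom_solution orders course → Spec_solution orders course (solution orders course)

-- ===== LEMMAS AND PROOFS =====

-- the flat list of all combination-strings A counts
def pvAllA (orders : List String) : List String :=
  orders.flatMap (fun i0 =>
    let i := PySem.List.sorted i0.toList (fun c => c) false
    (PySem.List.pyRange 2 ((i.length : Int) + 1) 1).flatMap (fun j =>
      (PySem.List.combinations i j.toNat).map String.ofList))

-- the flat list of length-r combination-strings B counts
def pvAllB (orders : List String) (r : Nat) : List String :=
  orders.flatMap (fun i0 =>
    (PySem.List.combinations (PySem.List.sorted i0.toList (fun c => c) false) r).map String.ofList)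

-- the distinct keys of length i with count > 1, on A's side and on B's side
def pvLA (orders : List String) (i : Int) : List String :=
  (PySem.Set.ofList (pvAllA orders)).filter
    (fun k => PySem.Str.len k == i && decide (((pvAllA orders).count k : Int) > 1))

def pvLB (orders : List String) (r : Nat) : List String :=
  (PySem.Set.ofList (pvAllB orders r)).filter
    (fun k => decide (((pvAllB orders r).count k : Int) > 1))

-- what one course element contributes to A's result resp. B's result
def pvFA (orders : List String) (i : Int) : List String :=
  if (pvA_temp (PySem.Dict.counter (pvAllA orders)) i).isEmpty then []
  else (pvA_temp (PySem.Dict.counter (pvAllA orders)) i).foldl (fun r p =>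
    match PySem.List.max? (pvA_temp (PySem.Dict.counter (pvAllA orders)) i) (fun x => x.2) with
    | some mx => if p.2 == mx.2 then r ++ [p.1] else r
    | none => r) []

-- max(map(len, orders), default=0)
def pvMax (orders : List String) : Int :=
  (PySem.List.max? (orders.map (fun o => PySem.Str.len o)) (fun v => v)).getD 0

def pvPick (best : List (String × Int)) : Option Int → List String
  | none => []
  | some m => (best.filter (fun p => p.2 == m)).map (fun p => p.1)

def pvFB (orders : List String) (L : Int) : List String :=
  if L < 2 ∨ pvMax orders < L then []
  else pvPick ((PySem.Dict.counter (pvAllB orders L.toNat)).items.filter (fun p => decide (p.2 > 1)))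
    (PySem.List.max? (((PySem.Dict.counter (pvAllB orders L.toNat)).items.filter (fun p => decide (p.2 > 1))).map (fun p => p.2)) (fun v => v))

theorem pvA_step_eq (d : PySem.Dict String Int) (k : String) :
    pvA_step d k = d.insert k (d.getD k 0 + 1) := by
  unfold pvA_step
  by_cases h : d.contains k = true
  · simp [h]
  · simp only [Bool.not_eq_true] at h
    rw [if_neg (by simp [h]), PySem.Dict.getD_of_not_contains (h := h)]
    norm_num

theorem pvA_dict_eq_counter (orders : List String) :
    pvA_dict orders = PySem.Dict.counter (pvAllA orders) := by
  unfold pvA_dict pvAllA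
  rw [← PySem.Dict.foldl_insert_getD_add_one_eq_counter]
  simp only [pvA_step_eq, List.foldl_flatMap, List.foldl_map]

theorem pv_len_mem_level (s : List Char) (r : Nat) (k : String)
    (hk : k ∈ (PySem.List.combinations s r).map String.ofList) : k.toList.length = r := by
  rcases List.mem_map.1 hk with ⟨c, hc, rfl⟩
  simp [PySem.List.length_of_mem_combinations hc]

theorem pv_count_flat (s : List Char) (k : String) (r : Nat) (hk : k.toList.length = r)
    (js : List Int) (hpos : ∀ j ∈ js, 2 ≤ j) (hnd : js.Nodup) :
    (js.flatMap (fun j => (PySem.List.combinations s j.toNat).map String.ofList)).count k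
      = if (r : Int) ∈ js then ((PySem.List.combinations s r).map String.ofList).count k else 0 := by
  induction js with
  | nil => simp
  | cons j t ih =>
    rcases List.nodup_cons.1 hnd with ⟨hjt, hndt⟩
    have hj2 : 2 ≤ j := hpos j (by simp)
    rw [List.flatMap_cons, List.count_append, ih (fun x hx => hpos x (by simp [hx])) hndt]
    by_cases hjr : j = (r : Int)
    · subst hjr
      simp [hjt]
    · have h0 : ((PySem.List.combinations s j.toNat).map String.ofList).count k = 0 := by
        rw [List.count_eq_zero]
        intro hmem
        have := pv_len_mem_level s j.toNat k hmem
        omega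
      rw [h0]
      by_cases hrt : (r : Int) ∈ t <;> simp [hrt, Ne.symm hjr]

theorem pv_count_eq (orders : List String) (r : Nat) (hr : 2 ≤ r) (k : String)
    (hk : k.toList.length = r) :
    (pvAllA orders).count k = (pvAllB orders r).count k := by
  induction orders with
  | nil => simp [pvAllA, pvAllB]
  | cons o t ih =>
    simp only [pvAllA, pvAllB, List.flatMap_cons, List.count_append] at *
    rw [ih]
    congr 1
    set s := PySem.List.sorted o.toList (fun c => c) false with hs
    rw [pv_count_flat s k r hk _
      (fun j hj => (PySem.List.mem_pyRange_one.1 hj).1)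
      (PySem.List.nodup_pyRange_one _ _)]
    by_cases hmem : (r : Int) ∈ PySem.List.pyRange 2 ((s.length : Int) + 1) 1
    · simp [hmem]
    · rw [if_neg hmem]
      rw [PySem.List.mem_pyRange_one] at hmem
      push Not at hmem
      have hlen : s.length < r := by
        by_cases h2 : (2:Int) ≤ (r:Int)
        · have := hmem h2; omega
        · omega
      have hnil : PySem.List.combinations s r = [] :=
        PySem.List.combinations_eq_nil_of_length_lt s hlen
      rw [hnil]
      simp

theorem pv_mem_allA_len (orders : List String) (k : String) (hk : k ∈ pvAllA orders) :
    2 ≤ k.toList.length := by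
  simp only [pvAllA, List.mem_flatMap] at hk
  rcases hk with ⟨o, _, j, hj, hk⟩
  have hj2 := (PySem.List.mem_pyRange_one.1 hj).1
  have := pv_len_mem_level _ _ _ hk
  omega

theorem pv_mem_allB_len (orders : List String) (r : Nat) (k : String)
    (hk : k ∈ pvAllB orders r) : k.toList.length = r := by
  simp only [pvAllB, List.mem_flatMap] at hk
  rcases hk with ⟨o, _, hk⟩
  exact pv_len_mem_level _ _ _ hk

theorem pv_temp_eq (orders : List String) (i : Int) :
    pvA_temp (PySem.Dict.counter (pvAllA orders)) i
      = (pvLA orders i).map (fun k => (k, ((pvAllA orders).count k : Int))) := by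
  unfold pvA_temp pvLA
  rw [PySem.Dict.items_counter, PySem.List.foldl_append_if_eq_filter, List.nil_append,
    List.filter_map]
  have hp : ((fun p : String × Int => PySem.Str.len p.1 == i && decide (p.2 > 1)) ∘
      (fun k => (k, ((pvAllA orders).count k : Int))))
      = (fun k => PySem.Str.len k == i && decide (((pvAllA orders).count k : Int) > 1)) := by
    funext k
    simp [Function.comp]
  rw [hp]

theorem pv_best_eq (orders : List String) (r : Nat) :
    ((PySem.Dict.counter (pvAllB orders r)).items.filter (fun p => decide (p.2 > 1)))
      = (pvLB orders r).map (fun k => (k, ((pvAllB orders r).count k : Int))) := by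
  unfold pvLB
  rw [PySem.Dict.items_counter, List.filter_map]
  have hp : ((fun p : String × Int => decide (p.2 > 1)) ∘
      (fun k => (k, ((pvAllB orders r).count k : Int))))
      = (fun k => decide (((pvAllB orders r).count k : Int) > 1)) := by
    funext k
    simp [Function.comp]
  rw [hp]

theorem pv_LA_nil_of_lt (orders : List String) (i : Int) (hi : i < 2) :
    pvLA orders i = [] := by
  unfold pvLA
  rw [List.filter_eq_nil_iff]
  intro k hk
  have h2 := pv_mem_allA_len orders k ((PySem.Set.mem_ofList _ _).1 hk)
  simp only [Bool.and_eq_true, beq_iff_eq, PySem.Str.len_eq]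
  rintro ⟨h, -⟩
  omega

theorem pv_perm_LA_LB (orders : List String) (i : Int) (hi : ¬ i < 2) :
    (pvLA orders i).Perm (pvLB orders i.toNat) := by
  have hr2 : 2 ≤ i.toNat := by omega
  apply (List.perm_ext_iff_of_nodup
    (List.Nodup.filter _ (PySem.Set.nodup_ofList _))
    (List.Nodup.filter _ (PySem.Set.nodup_ofList _))).mpr
  intro k
  simp only [List.mem_filter, PySem.Set.mem_ofList, Bool.and_eq_true, beq_iff_eq,
    PySem.Str.len_eq, decide_eq_true_eq]
  constructor
  · rintro ⟨hmem, hlen, hcnt⟩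
    have hlr : k.toList.length = i.toNat := by omega
    have hc := pv_count_eq orders i.toNat hr2 k hlr
    refine ⟨List.count_pos_iff.1 (by omega), by omega⟩
  · rintro ⟨hmem, hcnt⟩
    have hlr := pv_mem_allB_len orders i.toNat k hmem
    have hc := pv_count_eq orders i.toNat hr2 k hlr
    exact ⟨List.count_pos_iff.1 (by omega), by omega, by omega⟩

theorem pv_mem_LA_len (orders : List String) (i : Int) (k : String) (hk : k ∈ pvLA orders i) :
    (k.toList.length : Int) = i := by
  unfold pvLA at hk
  rcases List.mem_filter.1 hk with ⟨-, hp⟩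
  simp only [Bool.and_eq_true, beq_iff_eq, PySem.Str.len_eq] at hp
  exact hp.1

theorem pv_len_le_max (orders : List String) (o : String) (ho : o ∈ orders) :
    PySem.Str.len o ≤ pvMax orders := by
  unfold pvMax
  cases hmm : PySem.List.max? (orders.map (fun o => PySem.Str.len o)) (fun v => v) with
  | none =>
    have := (PySem.List.max?_eq_none_iff _ _).1 hmm
    simp only [List.map_eq_nil_iff] at this
    simp [this] at ho
  | some m =>
    simpa using PySem.List.max?_isMax hmm (PySem.Str.len o) (List.mem_map.2 ⟨o, ho, rfl⟩)

theorem pv_mem_allA_le (orders : List String) (k : String) (hk : k ∈ pvAllA orders) :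
    (k.toList.length : Int) ≤ pvMax orders := by
  simp only [pvAllA, List.mem_flatMap] at hk
  rcases hk with ⟨o, ho, j, hj, hk⟩
  rcases List.mem_map.1 hk with ⟨c, hc, rfl⟩
  have h1 : c.length ≤ (PySem.List.sorted o.toList (fun c => c) false).length :=
    (PySem.List.sublist_of_mem_combinations hc).length_le
  have h2 : (PySem.List.sorted o.toList (fun c => c) false).length = o.toList.length :=
    PySem.List.length_sorted _ _ _
  have h3 := pv_len_le_max orders o ho
  rw [PySem.Str.len_eq] at h3
  simp only [String.toList_ofList]
  omega

theorem pv_LA_nil_of_big (orders : List String) (i : Int) (hbig : pvMax orders < i) :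
    pvLA orders i = [] := by
  unfold pvLA
  rw [List.filter_eq_nil_iff]
  intro k hk
  have hle := pv_mem_allA_le orders k ((PySem.Set.mem_ofList _ _).1 hk)
  simp only [Bool.and_eq_true, beq_iff_eq, PySem.Str.len_eq]
  rintro ⟨h, -⟩
  omega

theorem pvFA_perm_pvFB (orders : List String) (i : Int) :
    (pvFA orders i).Perm (pvFB orders i) := by
  unfold pvFA pvFB
  by_cases hi : i < 2
  · rw [if_pos (Or.inl hi), pv_temp_eq, pv_LA_nil_of_lt orders i hi]
    simp
  by_cases hbig : pvMax orders < i
  · rw [if_pos (Or.inr hbig), pv_temp_eq, pv_LA_nil_of_big orders i hbig]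
    simp
  rw [if_neg (show ¬(i < 2 ∨ pvMax orders < i) by push Not; exact ⟨by omega, by omega⟩),
    pv_temp_eq, pv_best_eq]
  have hperm := pv_perm_LA_LB orders i hi
  by_cases hLA : pvLA orders i = []
  · have hLB : pvLB orders i.toNat = [] := (hLA ▸ hperm).symm.eq_nil
    rw [hLA, hLB]
    simp [PySem.List.max?, pvPick]
  · have hLB : pvLB orders i.toNat ≠ [] := fun h => hLA (h ▸ hperm).eq_nil
    have hcnt : ∀ k ∈ pvLA orders i,
        ((pvAllA orders).count k : Int) = ((pvAllB orders i.toNat).count k : Int) := by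
      intro k hk
      have h1 := pv_mem_LA_len orders i k hk
      have h2 := pv_count_eq orders i.toNat (by omega) k (by omega)
      omega
    have htne : ((pvLA orders i).map (fun k => (k, ((pvAllA orders).count k : Int)))).isEmpty = false := by
      simp [hLA]
    rw [htne]
    simp only [Bool.false_eq_true, if_false]
    cases hmx : PySem.List.max? ((pvLA orders i).map (fun k => (k, ((pvAllA orders).count k : Int)))) (fun x => x.2) with
    | none =>
      exact absurd (by simpa using (PySem.List.max?_eq_none_iff _ _).1 hmx) hLA
    | some mx =>
      cases hm : PySem.List.max? (((pvLB orders i.toNat).map (fun k => (k, ((pvAllB orders i.toNat).count k : Int)))).map (fun p => p.2)) (fun v => v) with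
      | none =>
        exact absurd (by simpa using (PySem.List.max?_eq_none_iff _ _).1 hm) hLB
      | some m =>
        simp only [pvPick]
        -- the two maxima agree
        have hmxmem := PySem.List.max?_mem hmx
        rcases List.mem_map.1 hmxmem with ⟨k0, hk0, rfl⟩
        have hmmem := PySem.List.max?_mem hm
        rw [List.map_map] at hmmem
        rcases List.mem_map.1 hmmem with ⟨k1, hk1, rfl⟩
        have hle1 : ((pvAllA orders).count k0 : Int) ≤ ((pvAllB orders i.toNat).count k1 : Int) := by
          have hk0B : k0 ∈ pvLB orders i.toNat := hperm.subset hk0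
          have := PySem.List.max?_isMax hm (((pvAllB orders i.toNat).count k0 : Int))
            (by rw [List.map_map]; exact List.mem_map.2 ⟨k0, hk0B, rfl⟩)
          rw [hcnt k0 hk0]
          simpa using this
        have hle2 : ((pvAllB orders i.toNat).count k1 : Int) ≤ ((pvAllA orders).count k0 : Int) := by
          have hk1A : k1 ∈ pvLA orders i := hperm.symm.subset hk1
          have := PySem.List.max?_isMax hmx (k1, ((pvAllA orders).count k1 : Int))
            (List.mem_map.2 ⟨k1, hk1A, rfl⟩)
          rw [← hcnt k1 hk1A]
          simpa using this
        have hM : ((pvAllA orders).count k0 : Int) = ((pvAllB orders i.toNat).count k1 : Int) :=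
          le_antisymm hle1 hle2
        rw [PySem.List.foldl_append_if
          (p := fun p : String × Int => p.2 == ((pvAllA orders).count k0 : Int))
          (f := fun p : String × Int => p.1), List.nil_append]
        rw [List.filter_map, List.map_map, List.filter_map, List.map_map]
        have hid1 : ((fun p : String × Int => p.1) ∘ (fun k => (k, ((pvAllA orders).count k : Int)))) = id := rfl
        have hid2 : ((fun p : String × Int => p.1) ∘ (fun k => (k, ((pvAllB orders i.toNat).count k : Int)))) = id := rfl
        rw [hid1, hid2, List.map_id, List.map_id]
        have hpred : ∀ k ∈ pvLA orders i,
            (((fun p : String × Int => p.2 == ((pvAllA orders).count k0 : Int)) ∘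
              (fun k => (k, ((pvAllA orders).count k : Int)))) k)
            = (((fun p : String × Int => p.2 == ((pvAllB orders i.toNat).count k1 : Int)) ∘
              (fun k => (k, ((pvAllB orders i.toNat).count k : Int)))) k) := by
          intro k hk
          simp only [Function.comp]
          rw [hcnt k hk, hM]
        rw [List.filter_congr hpred]
        exact hperm.filter _

theorem pv_foldlA (orders : List String) (course : List Int) (res : List String) :
    course.foldl (fun result i =>
      let temp := pvA_temp (PySem.Dict.counter (pvAllA orders)) i
      if temp.isEmpty then result
      else temp.foldl (fun r p =>
        match PySem.List.max? temp (fun x => x.2) with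
        | some mx => if p.2 == mx.2 then r ++ [p.1] else r
        | none => r) result) res
    = res ++ course.flatMap (pvFA orders) := by
  induction course generalizing res with
  | nil => simp
  | cons c t ih =>
    simp only [List.foldl_cons, List.flatMap_cons]
    rw [ih, ← List.append_assoc]
    congr 1
    unfold pvFA
    by_cases he : (pvA_temp (PySem.Dict.counter (pvAllA orders)) c).isEmpty = true
    · simp [he]
    · simp only [Bool.not_eq_true] at he
      simp only [he, Bool.false_eq_true, if_false]
      cases hmx : PySem.List.max? (pvA_temp (PySem.Dict.counter (pvAllA orders)) c) (fun x => x.2) with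
      | none => simp
      | some mx =>
        rw [PySem.List.foldl_append_if (p := fun p : String × Int => p.2 == mx.2)
              (f := fun p : String × Int => p.1),
            PySem.List.foldl_append_if (p := fun p : String × Int => p.2 == mx.2)
              (f := fun p : String × Int => p.1), List.nil_append]

theorem pv_foldlB (orders : List String) (course : List Int) (res : List String) :
    course.foldl (fun result L =>
      if L < 2 ∨ pvMax orders < L then result
      else
        let best := (PySem.Dict.counter (pvAllB orders L.toNat)).items.filter (fun p => decide (p.2 > 1))
        match PySem.List.max? (best.map (fun p => p.2)) (fun v => v) with
        | none => result
        | some m => result ++ (best.filter (fun p => p.2 == m)).map (fun p => p.1)) res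
    = res ++ course.flatMap (pvFB orders) := by
  induction course generalizing res with
  | nil => simp
  | cons c t ih =>
    simp only [List.foldl_cons, List.flatMap_cons]
    rw [ih, ← List.append_assoc]
    congr 1
    unfold pvFB
    by_cases hc : c < 2 ∨ pvMax orders < c
    · rw [if_pos hc, if_pos hc]
      simp
    · simp only [hc, if_false]
      cases hm : PySem.List.max? (((PySem.Dict.counter (pvAllB orders c.toNat)).items.filter (fun p => decide (p.2 > 1))).map (fun p => p.2)) (fun v => v) with
      | none => simp [pvPick]
      | some m => simp [pvPick]

theorem pv_flatMap_perm (course : List Int) (fA fB : Int → List String)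
    (h : ∀ i, (fA i).Perm (fB i)) : (course.flatMap fA).Perm (course.flatMap fB) := by
  induction course with
  | nil => simp
  | cons c t ih => simpa using (h c).append ih

theorem pvB_all_sorted_eq (orders : List String) (r : Nat) :
    pvB_all (orders.map (fun o => String.ofList (PySem.List.sorted o.toList (fun c => c) false))) r
      = pvAllB orders r := by
  unfold pvB_all pvAllB
  rw [List.flatMap_map]
  simp

theorem pv_solutionA_eq (orders : List String) (course : List Int) :
    solution orders course
      = PySem.List.sorted (course.flatMap (pvFA orders)) (fun x => x) false := by
  show PySem.List.sorted (course.foldl (fun result i =>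
      let temp := pvA_temp (pvA_dict orders) i
      if temp.isEmpty then result
      else temp.foldl (fun r p =>
        match PySem.List.max? temp (fun x => x.2) with
        | some mx => if p.2 == mx.2 then r ++ [p.1] else r
        | none => r) result) []) (fun x => x) false = _
  simp only [pvA_dict_eq_counter]
  rw [pv_foldlA, List.nil_append]

theorem pv_solutionB_eq (orders : List String) (course : List Int) :
    solution_alt orders course
      = PySem.List.sorted (course.flatMap (pvFB orders)) (fun x => x) false := by
  show PySem.List.sorted (course.foldl (fun result (L : Int) =>
      if L < 2 ∨ pvMax orders < L then result
      else
        let best := (PySem.Dict.counter (pvB_all (orders.map (fun o => String.ofList (PySem.List.sorted o.toList (fun c => c) false))) L.toNat)).items.filter (fun p => decide (p.2 > 1))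
        match PySem.List.max? (best.map (fun p => p.2)) (fun v => v) with
        | none => result
        | some m => result ++ (best.filter (fun p => p.2 == m)).map (fun p => p.1)) []) (fun x => x) false = _
  simp only [pvB_all_sorted_eq]
  rw [pv_foldlB, List.nil_append]

-- ===== VERDICT (by name: the statement is the Claim_ definition above) =====
theorem solution_spec : Claim_equal_solution := by
  intro orders course _
  unfold Spec_solution
  rw [pv_solutionA_eq, pv_solutionB_eq]
  exact PySem.List.sorted_eq_sorted_of_perm _ _ _ (fun a b h => h)
    (pv_flatMap_perm course _ _ (pvFA_perm_pvFB orders))
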